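-- pv_equiv track=rewrite | github.com/dudamarlena/pyc_source | pycfiles/sfm-0.0.17-py2.py3-none-any/textformatter.py | format_unix_var
-- ===== SOURCE A (Python) =====
-- import string
--
-- ALPHA_DIGITS = set(string.ascii_letters + string.digits)
--
-- def format_unix_var(text):
--     """
--     Example::
--
--         this_is_very_good
--     """
--     text = text.strip()
--     if len(text) == 0:
--         raise ValueError('can not be empty string!')
--     else:
--         if text[0] in string.digits:
--             raise ValueError('variable can not start with digits!')
--         text = text.lower()
--         words = list()
--         word = list()
--         for char in text:
--             if char in ALPHA_DIGITS:
--                 word.append(char)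
--             elif len(word):
--                 words.append(('').join(word))
--                 word = list()
--
--         if len(word):
--             words.append(('').join(word))
--         return ('_').join(words)
-- ===== SOURCE B (Python) =====
-- import re
-- import string
--
--
-- def format_unix_var(text):
--     text = text.strip()
--     if len(text) == 0:
--         raise ValueError('can not be empty string!')
--     if text[0] in string.digits:
--         raise ValueError('variable can not start with digits!')
--     return '_'.join(re.findall(r'[a-zA-Z0-9]+', text.lower()))
-- ===== Notes on version B (the rewrite author's own statement) =====
-- stated objective: idiomatic
-- what changed: Replaced the explicit word/words accumulator state machine with a single regex findall of maximal alphanumeric runs joined by underscores.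
import Mathlib
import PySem

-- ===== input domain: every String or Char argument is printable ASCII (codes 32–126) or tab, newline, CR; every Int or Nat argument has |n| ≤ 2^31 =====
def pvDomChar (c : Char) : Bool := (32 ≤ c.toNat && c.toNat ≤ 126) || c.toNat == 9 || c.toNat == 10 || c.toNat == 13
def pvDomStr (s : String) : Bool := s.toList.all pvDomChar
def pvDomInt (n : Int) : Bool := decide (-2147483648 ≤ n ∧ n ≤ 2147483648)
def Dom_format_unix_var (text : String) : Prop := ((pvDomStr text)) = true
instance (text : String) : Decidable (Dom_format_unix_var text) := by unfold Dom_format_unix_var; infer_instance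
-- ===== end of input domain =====

-- B is the idiomatic rewrite: the manual word/words accumulator loop is replaced by one
-- regex-style extraction of maximal alphanumeric runs; return values only (A mutates nothing).

-- shared helper: membership in ALPHA_DIGITS = string.ascii_letters + string.digits (A: 'char in
-- ALPHA_DIGITS'; B: the regex character class [a-zA-Z0-9], the same set of characters — exact)
def pvIsWordChar (c : Char) : Bool :=
  ("abcdefghijklmnopqrstuvwxyzABCDEFGHIJKLMNOPQRSTUVWXYZ0123456789".toList).contains c

-- ===== PORT A =====
-- A's loop body: state (words, word); raise branches return "" (excluded by Pre_)
def pvStepA (st : List (List Char) × List Char) (c : Char) : List (List Char) × List Char :=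
  if pvIsWordChar c then (st.1, st.2 ++ [c])
  else if st.2.length ≠ 0 then (st.1 ++ [st.2], []) else st

def format_unix_var (text : String) : String :=
  let t := PySem.Chars.strip text.toList
  if t.length = 0 then ""                         -- ValueError('can not be empty string!')
  else if PySem.Chars.isdigit t.headI then ""     -- ValueError('variable can not start with digits!')
  else
    let tl := PySem.Chars.lower t
    let st := tl.foldl pvStepA ([], [])
    let words := if st.2.length ≠ 0 then st.1 ++ [st.2] else st.1
    String.ofList (PySem.Chars.join ['_'] words)

-- ===== PORT B =====
-- re.findall(r'[a-zA-Z0-9]+', ·): the maximal runs of word characters, in order (exact)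
def pvTokens (cs : List Char) : List (List Char) :=
  match cs with
  | [] => []
  | c :: rest =>
      if pvIsWordChar c then
        (c :: rest.takeWhile pvIsWordChar) :: pvTokens (rest.dropWhile pvIsWordChar)
      else pvTokens rest
termination_by cs.length
decreasing_by
  · exact Nat.lt_succ_of_le (List.length_dropWhile_le ..)
  · exact Nat.lt_succ_self _

def format_unix_var_alt (text : String) : String :=
  let t := PySem.Chars.strip text.toList
  if t.length = 0 then ""                         -- ValueError('can not be empty string!')
  else if PySem.Chars.isdigit t.headI then ""     -- ValueError('variable can not start with digits!')
  else String.ofList (PySem.Chars.join ['_'] (pvTokens (PySem.Chars.lower t)))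

-- ===== PRECONDITION & SPEC =====
-- Pre_ excludes exactly the inputs where A raises ValueError (empty after strip, or leading digit);
-- B raises the same ValueError there.
def Pre_format_unix_var (text : String) : Prop :=
  (PySem.Chars.strip text.toList).length ≠ 0 ∧
  PySem.Chars.isdigit (PySem.Chars.strip text.toList).headI = false
instance (text : String) : Decidable (Pre_format_unix_var text) := by
  unfold Pre_format_unix_var; infer_instance

def pvWitness_format_unix_var : String := " This is_VERY good!! 2x "

def Spec_format_unix_var (text : String) (out : String) : Prop := out = format_unix_var_alt text
instance (text : String) (out : String) : Decidable (Spec_format_unix_var text out) := by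
  unfold Spec_format_unix_var; infer_instance

-- ===== CLAIM (what is proved, stated in full; the proofs are below) =====
def Claim_equal_format_unix_var : Prop :=
  ∀ (text : String), Dom_format_unix_var text → Pre_format_unix_var text →
    Spec_format_unix_var text (format_unix_var text)

-- ===== LEMMAS AND PROOFS =====

-- the accumulated words list is a prefix the loop never revisits
theorem pvFoldA_prefix (cs : List Char) (ws : List (List Char)) (w : List Char) :
    cs.foldl pvStepA (ws, w) =
      (ws ++ (cs.foldl pvStepA ([], w)).1, (cs.foldl pvStepA ([], w)).2) := by
  induction cs generalizing ws w with
  | nil => simp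
  | cons c cs ih =>
      simp only [List.foldl_cons, pvStepA]
      split_ifs with h1 h2
      · exact ih ws (w ++ [c])
      · simp only [List.nil_append]
        rw [ih (ws ++ [w]) [], ih [w] []]
        simp
      · exact ih ws w

-- A's flushed fold result, started with pending run w, is the token list (w extended by the
-- next maximal run first, if w is nonempty)
theorem pvFoldA_tokens (cs : List Char) (w : List Char) :
    (if ((cs.foldl pvStepA ([], w)).2).length ≠ 0
       then (cs.foldl pvStepA ([], w)).1 ++ [(cs.foldl pvStepA ([], w)).2]
       else (cs.foldl pvStepA ([], w)).1) =
      (if w.length ≠ 0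
         then (w ++ cs.takeWhile pvIsWordChar) :: pvTokens (cs.dropWhile pvIsWordChar)
         else pvTokens cs) := by
  induction cs generalizing w with
  | nil =>
      rcases w with _ | ⟨a, w⟩ <;> simp [pvTokens]
  | cons c cs ih =>
      simp only [List.foldl_cons, pvStepA]
      by_cases h1 : pvIsWordChar c
      · simp only [h1, if_pos]
        rw [ih (w ++ [c])]
        rcases w with _ | ⟨a, w⟩ <;>
          simp [pvTokens, h1]
      · simp only [h1, Bool.false_eq_true, if_false]
        rcases w with _ | ⟨a, w⟩
        · simpa [pvTokens, h1] using ih []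
        · simp only [List.length_cons, ne_eq, Nat.succ_ne_zero, not_false_iff, if_pos]
          rw [List.nil_append, pvFoldA_prefix cs [a :: w] []]
          simp only [List.takeWhile_cons, List.dropWhile_cons, h1, Bool.false_eq_true,
            if_false]
          rw [pvTokens]
          simp only [h1, Bool.false_eq_true, if_false]
          have h := ih []
          simp only [List.length_nil, ne_eq, not_true_eq_false, if_false] at h
          rw [← h]
          split_ifs <;> simp

-- ===== VERDICT (by name: the statement is the Claim_ definition above) =====
theorem format_unix_var_spec : Claim_equal_format_unix_var := by
  intro text _ hpre
  unfold Spec_format_unix_var format_unix_var format_unix_var_alt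
  obtain ⟨h1, h2⟩ := hpre
  simp only [h1, h2, if_false, Bool.false_eq_true]
  have := pvFoldA_tokens (PySem.Chars.lower (PySem.Chars.strip text.toList)) []
  simp only [List.length_nil, ne_eq, not_true_eq_false, if_false] at this
  rw [this]
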